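-- pv_equiv track=rewrite | github.com/jeatongt/advent-2023 | Day01/calibration-value-decoder.py | string_to_calibration_value
-- ===== SOURCE A (Python) =====
-- def string_to_calibration_value(calibration_string):
--     for character in calibration_string:
--         if character.isnumeric():
--             first_number = character
--             break
--     for character in calibration_string:
--         if character.isnumeric():
--             last_number = character
--     return 10*int(first_number) + int(last_number)
-- ===== SOURCE B (Python) =====
-- def string_to_calibration_value(calibration_string):
--     value = None
--     for character in calibration_string:
--         if character.isnumeric():
--             digit = int(character)
--             if value is None:
--                 value = 11 * digit
--             else:
--                 value = value - value % 10 + digit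
--     return value
-- ===== Notes on version B (the rewrite author's own statement) =====
-- stated objective: alternative
-- what changed: Replaces A's two staged scans (break-on-first, overwrite-for-last) with one pass maintaining a single integer accumulator: the first digit seeds 11*d and every later digit rewrites only the units place (value - value%10 + d), so no digit is stored and no second traversal or list exists.
import Mathlib
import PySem

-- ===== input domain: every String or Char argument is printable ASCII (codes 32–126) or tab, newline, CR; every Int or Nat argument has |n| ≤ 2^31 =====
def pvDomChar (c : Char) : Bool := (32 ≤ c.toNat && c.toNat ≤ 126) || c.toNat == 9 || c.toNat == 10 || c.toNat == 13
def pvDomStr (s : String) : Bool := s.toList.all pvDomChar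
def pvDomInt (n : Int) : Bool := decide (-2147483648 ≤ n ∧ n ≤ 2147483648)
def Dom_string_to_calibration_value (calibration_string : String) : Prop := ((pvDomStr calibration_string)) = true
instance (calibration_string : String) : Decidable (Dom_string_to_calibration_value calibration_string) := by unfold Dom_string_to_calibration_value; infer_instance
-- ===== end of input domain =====

-- B replaces A's two staged scans (break-on-first, overwrite-for-last) with a single pass
-- keeping one integer accumulator: the first digit seeds 11*d, each later digit rewrites only
-- the units place (value - value % 10 + d); objective: alternative decomposition, same cost.

-- ===== PORT A =====
-- first loop: scan with break, returning the first numeric character (none = loop found nothing)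
def pvFirstDigit : List Char → Option Char
  | [] => none
  | c :: cs => if PySem.Chars.isdigit c then some c else pvFirstDigit cs

-- second loop: scan to the end, overwriting last_number at each numeric character
def pvLastDigit (cs : List Char) : Option Char :=
  cs.foldl (fun acc c => if PySem.Chars.isdigit c then some c else acc) none

-- int(c) for a digit character c (exact on ASCII digits, which Pre_ guarantees)
def pvDigitVal (c : Char) : Int := (c.toNat : Int) - 48

def string_to_calibration_value (calibration_string : String) : Int :=
  match pvFirstDigit calibration_string.toList, pvLastDigit calibration_string.toList with
  | some f, some l => 10 * pvDigitVal f + pvDigitVal l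
  | _, _ => 0   -- unreachable under Pre_ (Python raises UnboundLocalError here)

-- ===== PORT B =====
-- loop body of B: a digit seeds 11*d on the first hit, later digits replace the units place
def pvStepB (acc : Option Int) (c : Char) : Option Int :=
  if PySem.Chars.isdigit c then
    some (match acc with
          | none => 11 * ((c.toNat : Int) - 48)
          | some v => v - PySem.Int.mod v 10 + ((c.toNat : Int) - 48))
  else acc

def string_to_calibration_value_alt (calibration_string : String) : Int :=
  match calibration_string.toList.foldl pvStepB none with
  | some v => v
  | none => 0   -- unreachable under Pre_ (Python B returns None here, not an int)

-- ===== PRECONDITION & SPEC =====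
-- Pre_: the string contains at least one digit; otherwise A raises UnboundLocalError
-- (and B returns None, not an int).
def Pre_string_to_calibration_value (calibration_string : String) : Prop :=
  calibration_string.toList.any PySem.Chars.isdigit = true
instance (calibration_string : String) : Decidable (Pre_string_to_calibration_value calibration_string) := by
  unfold Pre_string_to_calibration_value; infer_instance

def pvWitness_string_to_calibration_value : String := "a1b2c"

def Spec_string_to_calibration_value (calibration_string : String) (out : Int) : Prop := out = string_to_calibration_value_alt calibration_string
instance (calibration_string : String) (out : Int) : Decidable (Spec_string_to_calibration_value calibration_string out) := by unfold Spec_string_to_calibration_value; infer_instance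

-- ===== CLAIM (what is proved, stated in full; the proofs are below) =====
def Claim_equal_string_to_calibration_value : Prop := ∀ (calibration_string : String), Dom_string_to_calibration_value calibration_string → Pre_string_to_calibration_value calibration_string → Spec_string_to_calibration_value calibration_string (string_to_calibration_value calibration_string)

-- ===== LEMMAS AND PROOFS =====
theorem pvDigit_bounds (c : Char) (h : PySem.Chars.isdigit c = true) :
    48 ≤ c.toNat ∧ c.toNat ≤ 57 := by
  unfold PySem.Chars.isdigit at h
  simp [Char.le_def] at h
  exact h

theorem pvFirstDigit_eq_filter_head (cs : List Char) :
    pvFirstDigit cs = (cs.filter PySem.Chars.isdigit).head? := by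
  induction cs with
  | nil => rfl
  | cons c cs ih =>
    by_cases h : PySem.Chars.isdigit c = true <;>
      simp [pvFirstDigit, h, ih]

theorem pvLastDigit_foldl (cs : List Char) (acc : Option Char) :
    cs.foldl (fun acc c => if PySem.Chars.isdigit c then some c else acc) acc
      = ((cs.filter PySem.Chars.isdigit).getLast?).or acc := by
  induction cs generalizing acc with
  | nil => rfl
  | cons c cs ih =>
    by_cases h : PySem.Chars.isdigit c = true
    · simp only [List.foldl_cons, h, if_pos, List.filter_cons, ih (some c)]
      cases hf : cs.filter PySem.Chars.isdigit with
      | nil => simp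
      | cons d ds =>
        cases hg : (d :: ds).getLast? with
        | none => simp at hg
        | some a => simp [hg, List.getLast?_cons_cons, Option.or]
    · simp [List.foldl_cons, h, ih acc]

theorem pvLastDigit_eq_filter_getLast (cs : List Char) :
    pvLastDigit cs = (cs.filter PySem.Chars.isdigit).getLast? := by
  simp [pvLastDigit, pvLastDigit_foldl]

-- B's fold from an already-seeded accumulator: only the last digit of the rest matters.
theorem pvFoldB_some (cs : List Char) (v : Int) :
    cs.foldl pvStepB (some v)
      = some (match (cs.filter PySem.Chars.isdigit).getLast? with
              | some l => v - PySem.Int.mod v 10 + pvDigitVal l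
              | none => v) := by
  induction cs generalizing v with
  | nil => rfl
  | cons c cs ih =>
    by_cases h : PySem.Chars.isdigit c = true
    · have hb := pvDigit_bounds c h
      have hm : PySem.Int.mod v 10 = v % 10 := PySem.Int.mod_eq_emod_of_pos (by norm_num)
      have hm' : PySem.Int.mod (v - PySem.Int.mod v 10 + ((c.toNat : Int) - 48)) 10
          = (c.toNat : Int) - 48 := by
        rw [PySem.Int.mod_eq_emod_of_pos (by norm_num), hm]
        omega
      simp only [List.foldl_cons, pvStepB, h, if_pos, ih, List.filter_cons]
      cases hf : cs.filter PySem.Chars.isdigit with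
      | nil => simp [pvDigitVal]
      | cons d ds =>
        cases hg : (d :: ds).getLast? with
        | none => simp at hg
        | some a => simp [hg, List.getLast?_cons_cons, pvDigitVal]; omega
    · simp [List.foldl_cons, pvStepB, h, ih]

-- B's full fold equals A's first/last characterisation.
theorem pvFoldB_none (cs : List Char) :
    cs.foldl pvStepB none
      = match (cs.filter PySem.Chars.isdigit).head?,
              (cs.filter PySem.Chars.isdigit).getLast? with
        | some f, some l => some (10 * pvDigitVal f + pvDigitVal l)
        | _, _ => none := by
  induction cs with
  | nil => rfl
  | cons c cs ih =>
    by_cases h : PySem.Chars.isdigit c = true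
    · have hb := pvDigit_bounds c h
      have hm : PySem.Int.mod (11 * ((c.toNat : Int) - 48)) 10 = (c.toNat : Int) - 48 := by
        rw [PySem.Int.mod_eq_emod_of_pos (by norm_num)]
        omega
      simp only [List.foldl_cons, pvStepB, h, if_pos, pvFoldB_some, List.filter_cons]
      cases hf : cs.filter PySem.Chars.isdigit with
      | nil => simp [pvDigitVal]; ring
      | cons d ds =>
        cases hg : (d :: ds).getLast? with
        | none => simp at hg
        | some a => simp [hg, List.getLast?_cons_cons, pvDigitVal]; omega
    · simp [List.foldl_cons, pvStepB, h, ih]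

-- ===== VERDICT (by name: the statement is the Claim_ definition above) =====
theorem string_to_calibration_value_spec : Claim_equal_string_to_calibration_value := by
  intro s _ _
  unfold Spec_string_to_calibration_value string_to_calibration_value string_to_calibration_value_alt
  simp only [pvFirstDigit_eq_filter_head, pvLastDigit_eq_filter_getLast, pvFoldB_none]
  cases (List.filter PySem.Chars.isdigit s.toList).head? <;>
    cases (List.filter PySem.Chars.isdigit s.toList).getLast? <;> rfl
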